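-- pv_equiv track=rewrite | github.com/yihaozhong/LPractice | cubist.py | solve
-- ===== SOURCE A (Python) =====
-- class UnionFind:
--     def __init__(self, n):
--         # Initially, each node is its own parent (i.e., each node forms its own disjoint set)
--         self.parent = list(range(n))
--
--         # The rank of a node is a measure of the depth of the tree rooted at that node.
--         # It is used for balancing the trees to optimize the operations.
--         self.rank = [0] * n
--
--         # Keep track of the number of disjoint sets (initially, each node is its own set, so the count is n)
--         self.count = n
--
--     def find(self, x):
--         # If x is not the parent of itself, then it means x is not the representative of its set (i.e., it is not the root of the tree).
--         # So we recursively call find on its parent until we find the representative of the set (the root of the tree).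
--         # Along the way, we update each node's parent to the representative of the set (this is called "path compression" and it speeds up future operations).
--         if self.parent[x] != x:
--             self.parent[x] = self.find(self.parent[x])
--         return self.parent[x]
--
--     def union(self, x, y):
--         # Find the representatives (roots of the trees) for x and y
--         px, py = self.find(x), self.find(y)
--
--         # If x and y are in different sets, then we need to merge the sets
--         if px != py:
--             # The tree with the higher rank becomes the parent of the other tree
--             # This keeps the trees as balanced as possible, which ensures that operations are efficient
--             if self.rank[px] > self.rank[py]:
--                 self.parent[py] = px
--             else:
--                 self.parent[px] = py
--                 # If the ranks are equal, then it doesn't matter which tree becomes the parent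
--                 # But we need to increase the rank of the resulting tree, because its depth has increased
--                 if self.rank[px] == self.rank[py]:
--                     self.rank[py] += 1
--             # Since we've merged two sets, the number of disjoint sets has decreased by one
--             self.count -= 1
--
-- def solve(n, k, edges):
--     # Sort edges in decreasing order of weight
--     edges.sort(key=lambda x: -x[2])
--
--     uf = UnionFind(n)
--     for u, v, w in edges:
--         if uf.find(u) != uf.find(v):
--             uf.union(u, v)
--             if uf.count == k:
--                 return w
--     return -1
-- ===== SOURCE B (Python) =====
-- def solve(n, k, edges):
--     # Sort edges in decreasing order of weight (in place, like A)
--     edges.sort(key=lambda x: -x[2])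
--
--     # Quick-find: comp[i] is the label of node i's component
--     comp = list(range(n))
--     count = n
--     for u, v, w in edges:
--         a, b = comp[u], comp[v]
--         if a != b:
--             comp = [a if c == b else c for c in comp]
--             count -= 1
--             if count == k:
--                 return w
--     return -1
-- ===== Notes on version B (the rewrite author's own statement) =====
-- stated objective: simpler
-- what changed: Replaced the UnionFind class (union-by-rank forest with recursive path compression) by a flat quick-find label array: each merge relabels one component in a single sweep, so find/union/rank bookkeeping disappears; the in-place edge sort and the descending per-edge loop are kept.
import Mathlib
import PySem

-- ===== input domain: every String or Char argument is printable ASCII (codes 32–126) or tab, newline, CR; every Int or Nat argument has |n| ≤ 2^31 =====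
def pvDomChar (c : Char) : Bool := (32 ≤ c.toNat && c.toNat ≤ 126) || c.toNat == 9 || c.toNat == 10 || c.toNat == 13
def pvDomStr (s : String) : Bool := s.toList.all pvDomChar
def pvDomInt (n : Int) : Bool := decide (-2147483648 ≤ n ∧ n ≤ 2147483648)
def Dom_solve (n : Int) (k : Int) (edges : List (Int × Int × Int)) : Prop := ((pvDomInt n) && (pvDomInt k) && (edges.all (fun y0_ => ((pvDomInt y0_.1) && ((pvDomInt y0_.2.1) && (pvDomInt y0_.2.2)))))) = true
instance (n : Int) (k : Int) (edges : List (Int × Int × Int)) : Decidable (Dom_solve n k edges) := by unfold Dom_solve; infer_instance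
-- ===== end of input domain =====

-- B replaces A's union-by-rank+path-compression forest with a flat quick-find label
-- array (relabel one class on each merge); simpler, same return value.  Both A and B
-- sort `edges` in place; the equivalence proved here is about the return value.

-- ===== PORT A =====
-- UnionFind.find with path compression.  The fuel argument (n+1 at every call site)
-- only makes the recursion structural; on inputs satisfying Pre_ it never runs out.
def ufFind : Nat → List Int → Int → List Int × Int
  | 0, parent, x => (parent, x)
  | fuel+1, parent, x =>
    let px := PySem.List.pyGetD parent x 0
    if px ≠ x then
      match ufFind fuel parent px with
      | (p', r) => (PySem.List.pySetD p' x r, r)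
    else (parent, x)

-- UnionFind.union: state is (parent, rank, count)
def ufUnion (fuel : Nat) (parent rank : List Int) (count : Int) (x y : Int) :
    List Int × List Int × Int :=
  match ufFind fuel parent x with
  | (p1, px) =>
    match ufFind fuel p1 y with
    | (p2, py) =>
      if px ≠ py then
        if PySem.List.pyGetD rank px 0 > PySem.List.pyGetD rank py 0 then
          (PySem.List.pySetD p2 py px, rank, count - 1)
        else
          (PySem.List.pySetD p2 px py,
           if PySem.List.pyGetD rank px 0 = PySem.List.pyGetD rank py 0 then
             PySem.List.pySetD rank py (PySem.List.pyGetD rank py 0 + 1)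
           else rank,
           count - 1)
      else (p2, rank, count)

def solveLoopA (fuel : Nat) (k : Int) :
    List (Int × Int × Int) → List Int → List Int → Int → Int
  | [], _, _, _ => -1
  | (u, v, w) :: rest, parent, rank, count =>
    match ufFind fuel parent u with
    | (p1, ru) =>
      match ufFind fuel p1 v with
      | (p2, rv) =>
        if ru ≠ rv then
          match ufUnion fuel p2 rank count u v with
          | (p3, rank3, count3) =>
            if count3 = k then w else solveLoopA fuel k rest p3 rank3 count3
        else solveLoopA fuel k rest p2 rank count

def solve (n : Int) (k : Int) (edges : List (Int × Int × Int)) : Int :=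
  let es := PySem.List.sorted edges (fun x => -x.2.2) false
  solveLoopA (n.toNat + 1) k es (PySem.List.pyRange 0 n 1) (List.replicate n.toNat 0) n

-- ===== PORT B =====
def solveLoopB (k : Int) : List (Int × Int × Int) → List Int → Int → Int
  | [], _, _ => -1
  | (u, v, w) :: rest, comp, count =>
    let a := PySem.List.pyGetD comp u 0
    let b := PySem.List.pyGetD comp v 0
    if a ≠ b then
      let comp' := comp.map (fun c => if c = b then a else c)
      if count - 1 = k then w else solveLoopB k rest comp' (count - 1)
    else solveLoopB k rest comp count

def solve_alt (n : Int) (k : Int) (edges : List (Int × Int × Int)) : Int :=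
  solveLoopB k (PySem.List.sorted edges (fun x => -x.2.2) false) (PySem.List.pyRange 0 n 1) n

-- ===== PRECONDITION & SPEC =====
-- Pre_ excludes exactly the inputs on which A raises IndexError: an edge endpoint
-- outside the Python index range [-n, n) of the parent list.
def Pre_solve (n : Int) (k : Int) (edges : List (Int × Int × Int)) : Prop :=
  ∀ e ∈ edges, (-n ≤ e.1 ∧ e.1 < n) ∧ (-n ≤ e.2.1 ∧ e.2.1 < n)
instance (n : Int) (k : Int) (edges : List (Int × Int × Int)) : Decidable (Pre_solve n k edges) := by
  unfold Pre_solve; infer_instance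

def pvWitness_solve : Int × Int × (List (Int × Int × Int)) :=
  (4, 2, [(0, 1, 5), (1, 2, 7), (-1, 2, 3)])

def Spec_solve (n : Int) (k : Int) (edges : List (Int × Int × Int)) (out : Int) : Prop := out = solve_alt n k edges
instance (n : Int) (k : Int) (edges : List (Int × Int × Int)) (out : Int) : Decidable (Spec_solve n k edges out) := by unfold Spec_solve; infer_instance

-- ===== CLAIM (what is proved, stated in full; the proofs are below) =====
def Claim_equal_solve : Prop := ∀ (n : Int) (k : Int) (edges : List (Int × Int × Int)), Dom_solve n k edges → Pre_solve n k edges → Spec_solve n k edges (solve n k edges)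

-- ===== LEMMAS AND PROOFS =====

def rootOf : Nat → List Int → Int → Int
  | 0, _, x => x
  | fuel+1, p, x =>
    if PySem.List.pyGetD p x 0 = x then x else rootOf fuel p (PySem.List.pyGetD p x 0)

def RootF (n : Int) (p : List Int) (x : Int) : Int := rootOf (n.toNat + 1) p x

def Good (n : Int) (p rk : List Int) : Prop :=
  p.length = n.toNat ∧ rk.length = n.toNat ∧
  (∀ i : Int, 0 ≤ i → i < n →
    0 ≤ PySem.List.pyGetD p i 0 ∧ PySem.List.pyGetD p i 0 < n) ∧
  (∀ i : Int, 0 ≤ i → i < n →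
    PySem.List.pyGetD p i 0 = i ∨
    PySem.List.pyGetD rk i 0 < PySem.List.pyGetD rk (PySem.List.pyGetD p i 0) 0)

def RkB (n : Int) (rk : List Int) (count : Int) : Prop :=
  ∀ i : Int, 0 ≤ i → i < n →
    0 ≤ PySem.List.pyGetD rk i 0 ∧ PySem.List.pyGetD rk i 0 + count ≤ n

theorem rootOf_irrel (n : Int) (p rk : List Int) (count : Int)
    (hg : Good n p rk) (hrb : RkB n rk count) (hc : 1 ≤ count) :
    ∀ (fuel fuel' : Nat) (x : Int), 0 ≤ x → x < n →
      n.toNat - (PySem.List.pyGetD rk x 0).toNat ≤ fuel →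
      n.toNat - (PySem.List.pyGetD rk x 0).toNat ≤ fuel' →
      rootOf fuel p x = rootOf fuel' p x := by
  obtain ⟨hpl, hrl, hval, hord⟩ := hg
  intro fuel
  induction fuel using Nat.strong_induction_on with
  | _ fuel ih =>
    intro fuel' x hx0 hxn hm hm'
    have hbx := hrb x hx0 hxn
    have hmpos : 1 ≤ n.toNat - (PySem.List.pyGetD rk x 0).toNat := by omega
    obtain ⟨a, rfl⟩ : ∃ a, fuel = a + 1 := ⟨fuel - 1, by omega⟩
    obtain ⟨b, rfl⟩ : ∃ b, fuel' = b + 1 := ⟨fuel' - 1, by omega⟩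
    by_cases hpx : PySem.List.pyGetD p x 0 = x
    · simp [rootOf, hpx]
    · have hpb := hval x hx0 hxn
      have hlt : PySem.List.pyGetD rk x 0 < PySem.List.pyGetD rk (PySem.List.pyGetD p x 0) 0 := by
        rcases hord x hx0 hxn with h | h
        · exact absurd h hpx
        · exact h
      have hbp := hrb _ hpb.1 hpb.2
      simp only [rootOf, hpx, if_neg hpx]
      exact ih a (by omega) b _ hpb.1 hpb.2 (by omega) (by omega)

theorem rootOf_props (n : Int) (p rk : List Int) (count : Int)
    (hg : Good n p rk) (hrb : RkB n rk count) (hc : 1 ≤ count) :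
    ∀ (fuel : Nat) (x : Int), 0 ≤ x → x < n →
      n.toNat - (PySem.List.pyGetD rk x 0).toNat ≤ fuel →
      (PySem.List.pyGetD p (rootOf fuel p x) 0 = rootOf fuel p x ∧
       0 ≤ rootOf fuel p x ∧ rootOf fuel p x < n ∧
       PySem.List.pyGetD rk x 0 ≤ PySem.List.pyGetD rk (rootOf fuel p x) 0) := by
  obtain ⟨hpl, hrl, hval, hord⟩ := hg
  intro fuel
  induction fuel with
  | zero =>
    intro x hx0 hxn hm
    have h1 := hrb x hx0 hxn
    omega
  | succ f ih =>
    intro x hx0 hxn hm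
    by_cases hpx : PySem.List.pyGetD p x 0 = x
    · simp only [rootOf, if_pos hpx]
      exact ⟨hpx, hx0, hxn, le_refl _⟩
    · have hpb := hval x hx0 hxn
      have hlt : PySem.List.pyGetD rk x 0 < PySem.List.pyGetD rk (PySem.List.pyGetD p x 0) 0 := by
        rcases hord x hx0 hxn with h | h
        · exact absurd h hpx
        · exact h
      have hbx := hrb x hx0 hxn
      have hbp := hrb _ hpb.1 hpb.2
      simp only [rootOf, if_neg hpx]
      obtain ⟨c1, c2, c3, c4⟩ := ih _ hpb.1 hpb.2 (by omega)
      exact ⟨c1, c2, c3, by omega⟩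

theorem RootF_spec (n : Int) (p rk : List Int) (count : Int)
    (hg : Good n p rk) (hrb : RkB n rk count) (hc : 1 ≤ count)
    (x : Int) (hx0 : 0 ≤ x) (hxn : x < n) :
    PySem.List.pyGetD p (RootF n p x) 0 = RootF n p x ∧
    0 ≤ RootF n p x ∧ RootF n p x < n ∧
    PySem.List.pyGetD rk x 0 ≤ PySem.List.pyGetD rk (RootF n p x) 0 := by
  have hbx := hrb x hx0 hxn
  exact rootOf_props n p rk count hg hrb hc _ x hx0 hxn (by omega)

theorem RootF_unfold (n : Int) (p rk : List Int) (count : Int)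
    (hg : Good n p rk) (hrb : RkB n rk count) (hc : 1 ≤ count)
    (x : Int) (hx0 : 0 ≤ x) (hxn : x < n) :
    RootF n p x = if PySem.List.pyGetD p x 0 = x then x
                  else RootF n p (PySem.List.pyGetD p x 0) := by
  by_cases hpx : PySem.List.pyGetD p x 0 = x
  · simp [RootF, rootOf, hpx]
  · rw [if_neg hpx]
    have hpb := hg.2.2.1 x hx0 hxn
    have hbp := hrb _ hpb.1 hpb.2
    show rootOf (n.toNat + 1) p x = _
    simp only [rootOf, if_neg hpx]
    exact rootOf_irrel n p rk count hg hrb hc n.toNat (n.toNat+1) _ hpb.1 hpb.2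
      (by omega) (by omega)

theorem root_fixed (n : Int) (p rk : List Int) (count : Int)
    (hg : Good n p rk) (hrb : RkB n rk count) (hc : 1 ≤ count)
    (x : Int) (hx0 : 0 ≤ x) (hxn : x < n) (h : RootF n p x = x) :
    PySem.List.pyGetD p x 0 = x := by
  by_cases hpx : PySem.List.pyGetD p x 0 = x
  · exact hpx
  · exfalso
    have hu := RootF_unfold n p rk count hg hrb hc x hx0 hxn
    rw [if_neg hpx] at hu
    have hpb := hg.2.2.1 x hx0 hxn
    have hlt : PySem.List.pyGetD rk x 0 < PySem.List.pyGetD rk (PySem.List.pyGetD p x 0) 0 := by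
      rcases hg.2.2.2 x hx0 hxn with h' | h'
      · exact absurd h' hpx
      · exact h'
    have hs := RootF_spec n p rk count hg hrb hc _ hpb.1 hpb.2
    rw [← hu, h] at hs
    omega

theorem rank_lt_root (n : Int) (p rk : List Int) (count : Int)
    (hg : Good n p rk) (hrb : RkB n rk count) (hc : 1 ≤ count)
    (x : Int) (hx0 : 0 ≤ x) (hxn : x < n) :
    RootF n p x = x ∨ PySem.List.pyGetD rk x 0 < PySem.List.pyGetD rk (RootF n p x) 0 := by
  by_cases hpx : PySem.List.pyGetD p x 0 = x
  · left; rw [RootF_unfold n p rk count hg hrb hc x hx0 hxn, if_pos hpx]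
  · right
    rw [RootF_unfold n p rk count hg hrb hc x hx0 hxn, if_neg hpx]
    have hpb := hg.2.2.1 x hx0 hxn
    have hlt : PySem.List.pyGetD rk x 0 < PySem.List.pyGetD rk (PySem.List.pyGetD p x 0) 0 := by
      rcases hg.2.2.2 x hx0 hxn with h' | h'
      · exact absurd h' hpx
      · exact h'
    have hs := RootF_spec n p rk count hg hrb hc _ hpb.1 hpb.2
    omega

theorem getD_setD' (xs : List Int) (i j v : Int) (hi0 : 0 ≤ i) (hi : i < (xs.length : Int))
    (hj0 : 0 ≤ j) (hj : j < (xs.length : Int)) :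
    PySem.List.pyGetD (PySem.List.pySetD xs i v) j 0 =
      if j = i then v else PySem.List.pyGetD xs j 0 := by
  rw [PySem.List.pySetD_of_nonneg xs v hi0,
      PySem.List.pyGetD_eq_getElem _ 0 hj0 (by simpa using hj),
      PySem.List.pyGetD_eq_getElem _ 0 hj0 hj]
  rw [List.getElem_set]
  by_cases h : j = i
  · simp [h]
  · rw [if_neg (by omega), if_neg h]

theorem n_pos (n : Int) (rk : List Int) (count : Int)
    (hrb : RkB n rk count) (hc : 1 ≤ count) (x : Int) (hx0 : 0 ≤ x) (hxn : x < n) :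
    1 ≤ n := by
  have := hrb x hx0 hxn; omega

theorem root_set (n : Int) (p rk : List Int) (count : Int)
    (hg : Good n p rk) (hrb : RkB n rk count) (hc : 1 ≤ count)
    (x r : Int) (hx0 : 0 ≤ x) (hxn : x < n)
    (hr : RootF n p x = r) :
    Good n (PySem.List.pySetD p x r) rk ∧
    ∀ j : Int, 0 ≤ j → j < n → RootF n (PySem.List.pySetD p x r) j = RootF n p j := by
  have hn : 1 ≤ n := n_pos n rk count hrb hc x hx0 hxn
  have hplen : (p.length : Int) = n := by rw [hg.1]; omega
  have hrs := RootF_spec n p rk count hg hrb hc x hx0 hxn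
  rw [hr] at hrs
  obtain ⟨hrfix, hr0, hrn, _⟩ := hrs
  have hrdisj := rank_lt_root n p rk count hg hrb hc x hx0 hxn
  rw [hr] at hrdisj
  have hget : ∀ j : Int, 0 ≤ j → j < n →
      PySem.List.pyGetD (PySem.List.pySetD p x r) j 0 =
        if j = x then r else PySem.List.pyGetD p j 0 := by
    intro j hj0 hjn
    exact getD_setD' p x j r hx0 (by omega) hj0 (by omega)
  have hg' : Good n (PySem.List.pySetD p x r) rk := by
    refine ⟨by rw [PySem.List.length_pySetD, hg.1], hg.2.1, ?_, ?_⟩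
    · intro i hi0 hin
      rw [hget i hi0 hin]
      by_cases h : i = x
      · rw [if_pos h]; exact ⟨hr0, hrn⟩
      · rw [if_neg h]; exact hg.2.2.1 i hi0 hin
    · intro i hi0 hin
      rw [hget i hi0 hin]
      by_cases h : i = x
      · subst h
        rw [if_pos rfl]
        rcases hrdisj with h' | h'
        · left; omega
        · right; exact h'
      · rw [if_neg h]; exact hg.2.2.2 i hi0 hin
  refine ⟨hg', ?_⟩
  have key : ∀ (fuel : Nat) (j : Int), 0 ≤ j → j < n →
      n.toNat - (PySem.List.pyGetD rk j 0).toNat ≤ fuel →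
      RootF n (PySem.List.pySetD p x r) j = RootF n p j := by
    intro fuel
    induction fuel using Nat.strong_induction_on with
    | _ fuel ih =>
      intro j hj0 hjn hm
      have hbj := hrb j hj0 hjn
      by_cases hjx : j = x
      · subst hjx
        by_cases hrx : r = j
        · rw [RootF_unfold n _ rk count hg' hrb hc j hj0 hjn, hget j hj0 hjn,
              if_pos rfl, if_pos hrx, hr, hrx]
        · rw [RootF_unfold n _ rk count hg' hrb hc j hj0 hjn, hget j hj0 hjn,
              if_pos rfl, if_neg hrx, hr]
          rw [RootF_unfold n _ rk count hg' hrb hc r hr0 hrn, hget r hr0 hrn,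
              if_neg hrx, hrfix, if_pos rfl]
      · rw [RootF_unfold n _ rk count hg' hrb hc j hj0 hjn, hget j hj0 hjn, if_neg hjx]
        by_cases hpj : PySem.List.pyGetD p j 0 = j
        · rw [if_pos hpj, RootF_unfold n p rk count hg hrb hc j hj0 hjn, if_pos hpj]
        · rw [if_neg hpj, RootF_unfold n p rk count hg hrb hc j hj0 hjn, if_neg hpj]
          have hpb := hg.2.2.1 j hj0 hjn
          have hlt : PySem.List.pyGetD rk j 0 < PySem.List.pyGetD rk (PySem.List.pyGetD p j 0) 0 := by
            rcases hg.2.2.2 j hj0 hjn with h' | h'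
            · exact absurd h' hpj
            · exact h'
          have hbp := hrb _ hpb.1 hpb.2
          exact ih (fuel - 1) (by omega) _ hpb.1 hpb.2 (by omega)
  intro j hj0 hjn
  have hbj := hrb j hj0 hjn
  exact key (n.toNat + 1) j hj0 hjn (by omega)


theorem find_spec (n : Int) (p rk : List Int) (count : Int)
    (hg : Good n p rk) (hrb : RkB n rk count) (hc : 1 ≤ count) :
    ∀ (fuel : Nat) (x : Int), 0 ≤ x → x < n →
      n.toNat - (PySem.List.pyGetD rk x 0).toNat ≤ fuel →
      ((ufFind fuel p x).2 = RootF n p x ∧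
       Good n (ufFind fuel p x).1 rk ∧
       ∀ j : Int, 0 ≤ j → j < n → RootF n (ufFind fuel p x).1 j = RootF n p j) := by
  intro fuel
  induction fuel with
  | zero =>
    intro x hx0 hxn hm
    have h1 := hrb x hx0 hxn
    omega
  | succ f ih =>
    intro x hx0 hxn hm
    by_cases hpx : PySem.List.pyGetD p x 0 = x
    · have hstep : ufFind (f+1) p x = (p, x) := by
        simp only [ufFind]
        rw [if_neg (by simpa using hpx)]
      rw [hstep]
      refine ⟨?_, hg, fun j _ _ => rfl⟩
      rw [RootF_unfold n p rk count hg hrb hc x hx0 hxn, if_pos hpx]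
    · have hpb := hg.2.2.1 x hx0 hxn
      have hlt : PySem.List.pyGetD rk x 0 < PySem.List.pyGetD rk (PySem.List.pyGetD p x 0) 0 := by
        rcases hg.2.2.2 x hx0 hxn with h' | h'
        · exact absurd h' hpx
        · exact h'
      have hbx := hrb x hx0 hxn
      have hbp := hrb _ hpb.1 hpb.2
      obtain ⟨ih1, ih2, ih3⟩ := ih (PySem.List.pyGetD p x 0) hpb.1 hpb.2 (by omega)
      rcases hE : ufFind f p (PySem.List.pyGetD p x 0) with ⟨p'', r⟩
      rw [hE] at ih1 ih2 ih3
      simp only at ih1 ih2 ih3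
      have hstep : ufFind (f+1) p x = (PySem.List.pySetD p'' x r, r) := by
        simp only [ufFind]
        rw [if_pos (by simpa using hpx), hE]
      rw [hstep]
      have hrx : RootF n p x = r := by
        rw [RootF_unfold n p rk count hg hrb hc x hx0 hxn, if_neg hpx, ← ih1]
      have hrx'' : RootF n p'' x = r := by
        rw [ih3 x hx0 hxn, hrx]
      obtain ⟨hgood', hpres'⟩ :=
        root_set n p'' rk count ih2 hrb hc x r hx0 hxn hrx''
      refine ⟨by simpa using hrx.symm, by simpa using hgood', ?_⟩
      intro j hj0 hjn
      simp only
      rw [hpres' j hj0 hjn, ih3 j hj0 hjn]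

theorem setD_neg' (xs : List Int) (i v : Int) (h1 : -(xs.length : Int) ≤ i) (h2 : i < 0) :
    PySem.List.pySetD xs i v = PySem.List.pySetD xs (i + xs.length) v := by
  simp only [PySem.List.pySetD, PySem.List.pySet?, PySem.List.pyIdx?]
  rw [if_neg (by omega), if_pos h1, if_pos (by omega), if_pos (by omega)]
  have : xs.length - (-i).toNat = (i + xs.length).toNat := by omega
  rw [this]

theorem getD_neg' (xs : List Int) (i d : Int) (h1 : -(xs.length : Int) ≤ i) (h2 : i < 0) :
    PySem.List.pyGetD xs i d = PySem.List.pyGetD xs (i + xs.length) d := by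
  simp only [PySem.List.pyGetD, PySem.List.pyGet?, PySem.List.pyIdx?]
  rw [if_neg (by omega), if_pos h1, if_pos (by omega), if_pos (by omega)]
  have : xs.length - (-i).toNat = (i + xs.length).toNat := by omega
  rw [this]

/-- find on any Python-valid index, with the fuel `solve` actually passes. -/
theorem find_specF (n : Int) (p rk : List Int) (count : Int)
    (hg : Good n p rk) (hrb : RkB n rk count) (hc : 1 ≤ count)
    (x : Int) (hx : -n ≤ x) (hxn : x < n) :
    ((ufFind (n.toNat + 1) p x).2 = RootF n p (if x < 0 then x + n else x) ∧
     Good n (ufFind (n.toNat + 1) p x).1 rk ∧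
     ∀ j : Int, 0 ≤ j → j < n →
       RootF n (ufFind (n.toNat + 1) p x).1 j = RootF n p j) := by
  by_cases hneg : x < 0
  · rw [if_pos hneg]
    set nx := x + n with hnx
    have hn : 1 ≤ n := by omega
    have hnx0 : 0 ≤ nx := by omega
    have hnxn : nx < n := by omega
    have hplen : (p.length : Int) = n := by rw [hg.1]; omega
    have hgx : PySem.List.pyGetD p x 0 = PySem.List.pyGetD p nx 0 := by
      rw [getD_neg' p x 0 (by omega) hneg, hplen]
    have hpb := hg.2.2.1 nx hnx0 hnxn
    have hpxne : PySem.List.pyGetD p x 0 ≠ x := by rw [hgx]; omega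
    have hbp := hrb _ hpb.1 hpb.2
    obtain ⟨ih1, ih2, ih3⟩ :=
      find_spec n p rk count hg hrb hc n.toNat (PySem.List.pyGetD p nx 0) hpb.1 hpb.2 (by omega)
    rcases hE : ufFind n.toNat p (PySem.List.pyGetD p nx 0) with ⟨p'', r⟩
    rw [hE] at ih1 ih2 ih3
    simp only at ih1 ih2 ih3
    have hstep : ufFind (n.toNat + 1) p x = (PySem.List.pySetD p'' x r, r) := by
      simp only [ufFind]
      rw [if_pos (by simpa using hpxne), hgx, hE]
    rw [hstep]
    have hrnx : RootF n p nx = r := by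
      rw [RootF_unfold n p rk count hg hrb hc nx hnx0 hnxn]
      by_cases hroot : PySem.List.pyGetD p nx 0 = nx
      · rw [if_pos hroot]
        have hrr : RootF n p nx = nx := by
          rw [RootF_unfold n p rk count hg hrb hc nx hnx0 hnxn, if_pos hroot]
        rw [ih1, hroot, hrr]
      · rw [if_neg hroot, ← ih1]
    have hp''len : (p''.length : Int) = n := by rw [ih2.1]; omega
    have hsetx : PySem.List.pySetD p'' x r = PySem.List.pySetD p'' nx r := by
      rw [setD_neg' p'' x r (by omega) hneg, hp''len]
    have hrx'' : RootF n p'' nx = r := by rw [ih3 nx hnx0 hnxn, hrnx]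
    obtain ⟨hgood', hpres'⟩ :=
      root_set n p'' rk count ih2 hrb hc nx r hnx0 hnxn hrx''
    refine ⟨by simpa using hrnx.symm, ?_, ?_⟩
    · simpa [hsetx] using hgood'
    · intro j hj0 hjn
      simp only [hsetx]
      rw [hpres' j hj0 hjn, ih3 j hj0 hjn]
  · rw [if_neg hneg]
    have hx0 : 0 ≤ x := by omega
    have hbx := hrb x hx0 hxn
    exact find_spec n p rk count hg hrb hc (n.toNat + 1) x hx0 hxn (by omega)

theorem root_merge (n : Int) (p rk rk2 : List Int) (count : Int)
    (hg : Good n p rk) (hrb : RkB n rk count) (hc : 1 ≤ count)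
    (src dst : Int)
    (hs0 : 0 ≤ src) (hsn : src < n) (hd0 : 0 ≤ dst) (hdn : dst < n)
    (hsroot : PySem.List.pyGetD p src 0 = src)
    (hdroot : PySem.List.pyGetD p dst 0 = dst)
    (hne : src ≠ dst)
    (hrk2len : rk2.length = n.toNat)
    (hsame : ∀ i : Int, 0 ≤ i → i < n → i ≠ dst →
      PySem.List.pyGetD rk2 i 0 = PySem.List.pyGetD rk i 0)
    (hge : PySem.List.pyGetD rk dst 0 ≤ PySem.List.pyGetD rk2 dst 0)
    (hlt : PySem.List.pyGetD rk2 src 0 < PySem.List.pyGetD rk2 dst 0)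
    (hrb2 : RkB n rk2 (count - 1)) (hc2 : 1 ≤ count - 1) :
    Good n (PySem.List.pySetD p src dst) rk2 ∧
    ∀ j : Int, 0 ≤ j → j < n →
      RootF n (PySem.List.pySetD p src dst) j =
        (if RootF n p j = src then dst else RootF n p j) := by
  have hn : 1 ≤ n := n_pos n rk count hrb hc src hs0 hsn
  have hplen : (p.length : Int) = n := by rw [hg.1]; omega
  have hget : ∀ j : Int, 0 ≤ j → j < n →
      PySem.List.pyGetD (PySem.List.pySetD p src dst) j 0 =
        if j = src then dst else PySem.List.pyGetD p j 0 := by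
    intro j hj0 hjn
    exact getD_setD' p src j dst hs0 (by omega) hj0 (by omega)
  have hg' : Good n (PySem.List.pySetD p src dst) rk2 := by
    refine ⟨by rw [PySem.List.length_pySetD, hg.1], hrk2len, ?_, ?_⟩
    · intro i hi0 hin
      rw [hget i hi0 hin]
      by_cases h : i = src
      · rw [if_pos h]; exact ⟨hd0, hdn⟩
      · rw [if_neg h]; exact hg.2.2.1 i hi0 hin
    · intro i hi0 hin
      rw [hget i hi0 hin]
      by_cases h : i = src
      · subst h; rw [if_pos rfl]; right; exact hlt
      · rw [if_neg h]
        by_cases hd : i = dst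
        · subst hd; left; exact hdroot
        · rcases hg.2.2.2 i hi0 hin with h' | h'
          · left; exact h'
          · right
            have hpb := hg.2.2.1 i hi0 hin
            rw [hsame i hi0 hin hd]
            by_cases hpd : PySem.List.pyGetD p i 0 = dst
            · rw [hpd] at h' ⊢; omega
            · rw [hsame _ hpb.1 hpb.2 hpd]; exact h'
  refine ⟨hg', ?_⟩
  have key : ∀ (fuel : Nat) (j : Int), 0 ≤ j → j < n →
      n.toNat - (PySem.List.pyGetD rk2 j 0).toNat ≤ fuel →
      RootF n (PySem.List.pySetD p src dst) j =
        (if RootF n p j = src then dst else RootF n p j) := by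
    intro fuel
    induction fuel using Nat.strong_induction_on with
    | _ fuel ih =>
      intro j hj0 hjn hm
      by_cases hjs : j = src
      · subst hjs
        have h1 : RootF n p j = j := by
          rw [RootF_unfold n p rk count hg hrb hc j hj0 hjn, if_pos hsroot]
        rw [h1, if_pos rfl]
        have hdj : ¬ (dst = j) := fun h => hne h.symm
        rw [RootF_unfold n _ rk2 (count-1) hg' hrb2 hc2 j hj0 hjn, hget j hj0 hjn,
            if_pos rfl, if_neg hdj]
        rw [RootF_unfold n _ rk2 (count-1) hg' hrb2 hc2 dst hd0 hdn, hget dst hd0 hdn,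
            if_neg hdj, hdroot, if_pos rfl]
      · by_cases hpj : PySem.List.pyGetD p j 0 = j
        · have h1 : RootF n p j = j := by
            rw [RootF_unfold n p rk count hg hrb hc j hj0 hjn, if_pos hpj]
          rw [h1, if_neg hjs]
          rw [RootF_unfold n _ rk2 (count-1) hg' hrb2 hc2 j hj0 hjn, hget j hj0 hjn,
              if_neg hjs, if_pos hpj]
        · have hpb := hg.2.2.1 j hj0 hjn
          have hlt' : PySem.List.pyGetD rk j 0 < PySem.List.pyGetD rk (PySem.List.pyGetD p j 0) 0 := by
            rcases hg.2.2.2 j hj0 hjn with h' | h'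
            · exact absurd h' hpj
            · exact h'
          have hjd : j ≠ dst := by intro h; rw [h] at hpj; exact hpj hdroot
          have hm2 : PySem.List.pyGetD rk2 j 0 < PySem.List.pyGetD rk2 (PySem.List.pyGetD p j 0) 0 := by
            rw [hsame j hj0 hjn hjd]
            by_cases hpd : PySem.List.pyGetD p j 0 = dst
            · rw [hpd] at hlt' ⊢; omega
            · rw [hsame _ hpb.1 hpb.2 hpd]; exact hlt'
          have hbj := hrb2 j hj0 hjn
          have hbp := hrb2 _ hpb.1 hpb.2
          rw [RootF_unfold n _ rk2 (count-1) hg' hrb2 hc2 j hj0 hjn, hget j hj0 hjn,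
              if_neg hjs, if_neg hpj,
              RootF_unfold n p rk count hg hrb hc j hj0 hjn, if_neg hpj]
          exact ih (fuel - 1) (by omega) _ hpb.1 hpb.2 (by omega)
  intro j hj0 hjn
  have hbj := hrb2 j hj0 hjn
  exact key (n.toNat + 1) j hj0 hjn (by omega)

theorem getD_map (xs : List Int) (f : Int → Int) (i : Int) (h0 : 0 ≤ i)
    (h1 : i < (xs.length : Int)) :
    PySem.List.pyGetD (xs.map f) i 0 = f (PySem.List.pyGetD xs i 0) := by
  rw [PySem.List.pyGetD_eq_getElem _ 0 h0 (by simpa using h1),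
      PySem.List.pyGetD_eq_getElem _ 0 h0 h1]
  simp

theorem getD_mem (xs : List Int) (i : Int) (h0 : 0 ≤ i) (h1 : i < (xs.length : Int)) :
    PySem.List.pyGetD xs i 0 ∈ xs := by
  rw [PySem.List.pyGetD_eq_getElem _ 0 h0 h1]
  exact List.getElem_mem _

theorem card_merge (comp : List Int) (a b : Int) (ha : a ∈ comp) (hb : b ∈ comp) (hne : a ≠ b) :
    (comp.map (fun c => if c = b then a else c)).toFinset.card = comp.toFinset.card - 1 := by
  have himg : (comp.map (fun c => if c = b then a else c)).toFinset = comp.toFinset.erase b := by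
    ext x
    simp only [List.mem_toFinset, List.mem_map, Finset.mem_erase]
    constructor
    · rintro ⟨c, hc, hfc⟩
      by_cases hcb : c = b
      · subst hcb; simp at hfc; exact ⟨by omega, hfc ▸ ha⟩
      · simp [hcb] at hfc; exact ⟨hfc ▸ hcb, hfc ▸ hc⟩
    · rintro ⟨hxb, hx⟩
      exact ⟨x, hx, by simp [hxb]⟩
  rw [himg, Finset.card_erase_of_mem (by simpa using hb)]

theorem merge_corr (Ri Rj s d ci cj sb db : Int)
    (hsd : s ≠ d) (hb : sb ≠ db)
    (his : Ri = s ↔ ci = sb) (hid : Ri = d ↔ ci = db)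
    (hjs : Rj = s ↔ cj = sb) (hjd : Rj = d ↔ cj = db)
    (hij : Ri = Rj ↔ ci = cj) :
    ((if Ri = s then d else Ri) = (if Rj = s then d else Rj)) ↔
    ((if ci = sb then db else ci) = (if cj = sb then db else cj)) := by
  by_cases h1 : Ri = s <;> by_cases h2 : Rj = s <;>
    simp_all <;> omega




theorem merge_corr2 (Ri Rj s d ci cj a b : Int)
    (hsd : s ≠ d) (hab : a ≠ b)
    (his : Ri = s ↔ ci = a) (hid : Ri = d ↔ ci = b)
    (hjs : Rj = s ↔ cj = a) (hjd : Rj = d ↔ cj = b)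
    (hij : Ri = Rj ↔ ci = cj) :
    ((if Ri = s then d else Ri) = (if Rj = s then d else Rj)) ↔
    ((if ci = b then a else ci) = (if cj = b then a else cj)) := by
  by_cases h1 : Ri = s <;> by_cases h2 : Rj = s <;>
    simp_all <;> omega

theorem getD_norm (xs : List Int) (n x : Int) (hlen : (xs.length : Int) = n)
    (h1 : -n ≤ x) (h2 : x < n) :
    PySem.List.pyGetD xs x 0 = PySem.List.pyGetD xs (if x < 0 then x + n else x) 0 := by
  by_cases hneg : x < 0
  · rw [if_pos hneg, getD_neg' xs x 0 (by omega) hneg, hlen]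
  · rw [if_neg hneg]

theorem loop_eq (n k : Int) (hn : 1 ≤ n) :
    ∀ (es : List (Int × Int × Int)) (p rk comp : List Int) (count : Int),
      Good n p rk → RkB n rk count →
      comp.length = n.toNat →
      count = (comp.toFinset.card : Int) →
      (∀ i j : Int, 0 ≤ i → i < n → 0 ≤ j → j < n →
        (RootF n p i = RootF n p j ↔
         PySem.List.pyGetD comp i 0 = PySem.List.pyGetD comp j 0)) →
      (∀ e ∈ es, (-n ≤ e.1 ∧ e.1 < n) ∧ (-n ≤ e.2.1 ∧ e.2.1 < n)) →
      solveLoopA (n.toNat + 1) k es p rk count = solveLoopB k es comp count := by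
  intro es
  induction es with
  | nil => intro p rk comp count _ _ _ _ _ _; rfl
  | cons e rest ih =>
    obtain ⟨u, v, w⟩ := e
    intro p rk comp count hg hrb hlen hcard hiff hes
    obtain ⟨⟨hu1, hu2⟩, hv1, hv2⟩ := hes (u, v, w) (by simp)
    simp only at hu1 hu2 hv1 hv2
    have hrest : ∀ e ∈ rest, (-n ≤ e.1 ∧ e.1 < n) ∧ (-n ≤ e.2.1 ∧ e.2.1 < n) :=
      fun e he => hes e (by simp [he])
    have hclen : (comp.length : Int) = n := by rw [hlen]; omega
    -- count ≥ 1
    have hcpos : 0 < comp.toFinset.card := by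
      rw [Finset.card_pos]
      cases comp with
      | nil => simp at hlen; omega
      | cons c t => exact ⟨c, by simp⟩
    have hc : 1 ≤ count := by omega
    -- normalized indices
    set nu : Int := if u < 0 then u + n else u with hnu
    set nv : Int := if v < 0 then v + n else v with hnv
    have hnu0 : 0 ≤ nu := by rw [hnu]; split <;> omega
    have hnun : nu < n := by rw [hnu]; split <;> omega
    have hnv0 : 0 ≤ nv := by rw [hnv]; split <;> omega
    have hnvn : nv < n := by rw [hnv]; split <;> omega
    -- the two finds of the loop condition
    obtain ⟨e1a, e1b, e1c⟩ := find_specF n p rk count hg hrb hc u hu1 hu2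
    rcases hF1 : ufFind (n.toNat + 1) p u with ⟨p1, ru⟩
    rw [hF1] at e1a e1b e1c
    simp only at e1a e1b e1c
    obtain ⟨e2a, e2b, e2c⟩ := find_specF n p1 rk count e1b hrb hc v hv1 hv2
    rcases hF2 : ufFind (n.toNat + 1) p1 v with ⟨p2, rv⟩
    rw [hF2] at e2a e2b e2c
    simp only at e2a e2b e2c
    have hru : ru = RootF n p nu := by rw [e1a]
    have hrv : rv = RootF n p nv := by rw [e2a, e1c nv hnv0 hnvn]
    have hp2root : ∀ j : Int, 0 ≤ j → j < n → RootF n p2 j = RootF n p j := by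
      intro j hj0 hjn; rw [e2c j hj0 hjn, e1c j hj0 hjn]
    -- comp side values
    have hga : PySem.List.pyGetD comp u 0 = PySem.List.pyGetD comp nu 0 :=
      getD_norm comp n u hclen hu1 hu2
    have hgb : PySem.List.pyGetD comp v 0 = PySem.List.pyGetD comp nv 0 :=
      getD_norm comp n v hclen hv1 hv2
    -- branch condition correspondence
    have hcond : (RootF n p nu = RootF n p nv) ↔
        (PySem.List.pyGetD comp nu 0 = PySem.List.pyGetD comp nv 0) :=
      hiff nu nv hnu0 hnun hnv0 hnvn
    -- unfold one step of loop A
    have hA : solveLoopA (n.toNat + 1) k ((u, v, w) :: rest) p rk count =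
        (if ru ≠ rv then
          (match ufUnion (n.toNat + 1) p2 rk count u v with
           | (p3, rank3, count3) =>
             if count3 = k then w else solveLoopA (n.toNat + 1) k rest p3 rank3 count3)
         else solveLoopA (n.toNat + 1) k rest p2 rk count) := by
      simp only [solveLoopA]
      rw [hF1, hF2]
    -- unfold one step of loop B
    have hB : solveLoopB k ((u, v, w) :: rest) comp count =
        (if PySem.List.pyGetD comp u 0 ≠ PySem.List.pyGetD comp v 0 then
          (if count - 1 = k then w
           else solveLoopB k rest
             (comp.map (fun c => if c = PySem.List.pyGetD comp v 0
                                 then PySem.List.pyGetD comp u 0 else c)) (count - 1))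
         else solveLoopB k rest comp count) := by
      simp only [solveLoopB]
    rw [hA, hB]
    by_cases heq : RootF n p nu = RootF n p nv
    · -- roots equal: both sides skip the edge
      rw [if_neg (by rw [hru, hrv]; simpa using heq),
          if_neg (by rw [hga, hgb]; simpa using hcond.mp heq)]
      apply ih p2 rk comp count e2b hrb hlen hcard _ hrest
      intro i j hi0 hin hj0 hjn
      rw [hp2root i hi0 hin, hp2root j hj0 hjn]
      exact hiff i j hi0 hin hj0 hjn
    · -- roots differ: both sides merge
      have hab : PySem.List.pyGetD comp nu 0 ≠ PySem.List.pyGetD comp nv 0 := by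
        intro h; exact heq (hcond.mpr h)
      rw [if_pos (by rw [hru, hrv]; simpa using heq),
          if_pos (by rw [hga, hgb]; simpa using hab)]
      rw [hga, hgb]
      -- the two finds inside union
      obtain ⟨e3a, e3b, e3c⟩ := find_specF n p2 rk count e2b hrb hc u hu1 hu2
      rcases hF3 : ufFind (n.toNat + 1) p2 u with ⟨p3, ru'⟩
      rw [hF3] at e3a e3b e3c
      simp only at e3a e3b e3c
      obtain ⟨e4a, e4b, e4c⟩ := find_specF n p3 rk count e3b hrb hc v hv1 hv2
      rcases hF4 : ufFind (n.toNat + 1) p3 v with ⟨p4, rv'⟩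
      rw [hF4] at e4a e4b e4c
      simp only at e4a e4b e4c
      have hru' : ru' = RootF n p nu := by rw [e3a, hp2root nu hnu0 hnun]
      have hrv' : rv' = RootF n p nv := by
        rw [e4a, e3c nv hnv0 hnvn, hp2root nv hnv0 hnvn]
      have hp4root : ∀ j : Int, 0 ≤ j → j < n → RootF n p4 j = RootF n p j := by
        intro j hj0 hjn
        rw [e4c j hj0 hjn, e3c j hj0 hjn, hp2root j hj0 hjn]
      -- names for the merged roots and labels
      have hRu := RootF_spec n p rk count hg hrb hc nu hnu0 hnun
      have hRv := RootF_spec n p rk count hg hrb hc nv hnv0 hnvn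
      have hRuroot : PySem.List.pyGetD p4 (RootF n p nu) 0 = RootF n p nu := by
        apply root_fixed n p4 rk count e4b hrb hc _ hRu.2.1 hRu.2.2.1
        rw [hp4root _ hRu.2.1 hRu.2.2.1]
        rw [RootF_unfold n p rk count hg hrb hc _ hRu.2.1 hRu.2.2.1, if_pos hRu.1]
      have hRvroot : PySem.List.pyGetD p4 (RootF n p nv) 0 = RootF n p nv := by
        apply root_fixed n p4 rk count e4b hrb hc _ hRv.2.1 hRv.2.2.1
        rw [hp4root _ hRv.2.1 hRv.2.2.1]
        rw [RootF_unfold n p rk count hg hrb hc _ hRv.2.1 hRv.2.2.1, if_pos hRv.1]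
      -- count ≥ 2: two distinct labels are present
      have hamem : PySem.List.pyGetD comp nu 0 ∈ comp := getD_mem comp nu hnu0 (by omega)
      have hbmem : PySem.List.pyGetD comp nv 0 ∈ comp := getD_mem comp nv hnv0 (by omega)
      have h2card : 2 ≤ comp.toFinset.card := by
        apply Finset.one_lt_card.mpr
        exact ⟨_, by simpa using hamem, _, by simpa using hbmem, hab⟩
      have hc2 : 1 ≤ count - 1 := by omega
      -- the new comp and its card
      have hcard' : count - 1 = ((comp.map (fun c => if c = PySem.List.pyGetD comp nv 0
          then PySem.List.pyGetD comp nu 0 else c)).toFinset.card : Int) := by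
        rw [card_merge comp _ _ hamem hbmem hab]
        omega
      have hcomp'len : (comp.map (fun c => if c = PySem.List.pyGetD comp nv 0
          then PySem.List.pyGetD comp nu 0 else c)).length = n.toNat := by
        rw [List.length_map, hlen]
      have hcomp'get : ∀ i : Int, 0 ≤ i → i < n →
          PySem.List.pyGetD (comp.map (fun c => if c = PySem.List.pyGetD comp nv 0
            then PySem.List.pyGetD comp nu 0 else c)) i 0 =
          (if PySem.List.pyGetD comp i 0 = PySem.List.pyGetD comp nv 0
           then PySem.List.pyGetD comp nu 0 else PySem.List.pyGetD comp i 0) := by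
        intro i hi0 hin
        exact getD_map comp _ i hi0 (by omega)
      -- case on the rank comparison
      by_cases hrank : PySem.List.pyGetD rk (RootF n p nu) 0 > PySem.List.pyGetD rk (RootF n p nv) 0
      · -- A merges Rv into Ru
        have hU : ufUnion (n.toNat + 1) p2 rk count u v =
            (PySem.List.pySetD p4 (RootF n p nv) (RootF n p nu), rk, count - 1) := by
          simp only [ufUnion]
          rw [hF3, hF4]
          rw [hru', hrv']
          rw [if_pos (by simpa using heq), if_pos hrank]
        simp only [hU]
        obtain ⟨hg5, hremap⟩ := root_merge n p4 rk rk count e4b hrb hc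
          (RootF n p nv) (RootF n p nu) hRv.2.1 hRv.2.2.1 hRu.2.1 hRu.2.2.1
          hRvroot hRuroot (fun h => heq h.symm) hg.2.1
          (fun i _ _ _ => rfl) (le_refl _) (by omega)
          (fun i hi0 hin => by have := hrb i hi0 hin; omega) hc2
        by_cases hk : count - 1 = k
        · rw [if_pos hk, if_pos hk]
        · rw [if_neg hk, if_neg hk]
          apply ih _ rk _ (count - 1) hg5
            (fun i hi0 hin => by have := hrb i hi0 hin; omega)
            hcomp'len hcard' _ hrest
          intro i j hi0 hin hj0 hjn
          rw [hremap i hi0 hin, hremap j hj0 hjn,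
              hp4root i hi0 hin, hp4root j hj0 hjn,
              hcomp'get i hi0 hin, hcomp'get j hj0 hjn]
          exact merge_corr (RootF n p i) (RootF n p j) (RootF n p nv) (RootF n p nu)
            (PySem.List.pyGetD comp i 0) (PySem.List.pyGetD comp j 0)
            (PySem.List.pyGetD comp nv 0) (PySem.List.pyGetD comp nu 0)
            (fun h => heq h.symm) (fun h => hab h.symm)
            (hiff i nv hi0 hin hnv0 hnvn) (hiff i nu hi0 hin hnu0 hnun)
            (hiff j nv hj0 hjn hnv0 hnvn) (hiff j nu hj0 hjn hnu0 hnun)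
            (hiff i j hi0 hin hj0 hjn)
      · -- A merges Ru into Rv (and may bump Rv's rank)
        set rk2 : List Int := if PySem.List.pyGetD rk (RootF n p nu) 0 =
            PySem.List.pyGetD rk (RootF n p nv) 0 then
            PySem.List.pySetD rk (RootF n p nv) (PySem.List.pyGetD rk (RootF n p nv) 0 + 1)
          else rk with hrk2
        have hU : ufUnion (n.toNat + 1) p2 rk count u v =
            (PySem.List.pySetD p4 (RootF n p nu) (RootF n p nv), rk2, count - 1) := by
          simp only [ufUnion]
          rw [hF3, hF4]
          rw [hru', hrv']
          rw [if_pos (by simpa using heq), if_neg hrank, hrk2]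
        simp only [hU]
        have hrk2len : rk2.length = n.toNat := by
          rw [hrk2]; split
          · rw [PySem.List.length_pySetD, hg.2.1]
          · exact hg.2.1
        have hrklen : (rk.length : Int) = n := by rw [hg.2.1]; omega
        have hrk2get : ∀ i : Int, 0 ≤ i → i < n →
            PySem.List.pyGetD rk2 i 0 =
              (if PySem.List.pyGetD rk (RootF n p nu) 0 =
                  PySem.List.pyGetD rk (RootF n p nv) 0 ∧ i = RootF n p nv then
                PySem.List.pyGetD rk (RootF n p nv) 0 + 1
               else PySem.List.pyGetD rk i 0) := by
          intro i hi0 hin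
          rw [hrk2]
          by_cases hcase : PySem.List.pyGetD rk (RootF n p nu) 0 =
              PySem.List.pyGetD rk (RootF n p nv) 0
          · rw [if_pos hcase,
                getD_setD' rk (RootF n p nv) i _ hRv.2.1 (by omega) hi0 (by omega)]
            by_cases h' : i = RootF n p nv
            · rw [if_pos h', if_pos ⟨hcase, h'⟩]
            · rw [if_neg h', if_neg (by tauto)]
          · rw [if_neg hcase, if_neg (by tauto)]
        have hsame : ∀ i : Int, 0 ≤ i → i < n → i ≠ RootF n p nv →
            PySem.List.pyGetD rk2 i 0 = PySem.List.pyGetD rk i 0 := by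
          intro i hi0 hin hne'
          rw [hrk2get i hi0 hin, if_neg (by tauto)]
        have hge : PySem.List.pyGetD rk (RootF n p nv) 0 ≤
            PySem.List.pyGetD rk2 (RootF n p nv) 0 := by
          rw [hrk2get _ hRv.2.1 hRv.2.2.1]
          split <;> omega
        have hlt : PySem.List.pyGetD rk2 (RootF n p nu) 0 <
            PySem.List.pyGetD rk2 (RootF n p nv) 0 := by
          rw [hrk2get _ hRu.2.1 hRu.2.2.1, hrk2get _ hRv.2.1 hRv.2.2.1]
          have hner : RootF n p nu ≠ RootF n p nv := heq
          rw [if_neg (by tauto)]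
          split <;> omega
        have hrb2 : RkB n rk2 (count - 1) := by
          intro i hi0 hin
          rw [hrk2get i hi0 hin]
          have h1 := hrb i hi0 hin
          have h2 := hrb _ hRv.2.1 hRv.2.2.1
          split <;> omega
        obtain ⟨hg5, hremap⟩ := root_merge n p4 rk rk2 count e4b hrb hc
          (RootF n p nu) (RootF n p nv) hRu.2.1 hRu.2.2.1 hRv.2.1 hRv.2.2.1
          hRuroot hRvroot heq hrk2len hsame hge hlt hrb2 hc2
        by_cases hk : count - 1 = k
        · rw [if_pos hk, if_pos hk]
        · rw [if_neg hk, if_neg hk]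
          apply ih _ rk2 _ (count - 1) hg5 hrb2 hcomp'len hcard' _ hrest
          intro i j hi0 hin hj0 hjn
          rw [hremap i hi0 hin, hremap j hj0 hjn,
              hp4root i hi0 hin, hp4root j hj0 hjn,
              hcomp'get i hi0 hin, hcomp'get j hj0 hjn]
          exact merge_corr2 (RootF n p i) (RootF n p j) (RootF n p nu) (RootF n p nv)
            (PySem.List.pyGetD comp i 0) (PySem.List.pyGetD comp j 0)
            (PySem.List.pyGetD comp nu 0) (PySem.List.pyGetD comp nv 0)
            heq hab
            (hiff i nu hi0 hin hnu0 hnun) (hiff i nv hi0 hin hnv0 hnvn)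
            (hiff j nu hj0 hjn hnu0 hnun) (hiff j nv hj0 hjn hnv0 hnvn)
            (hiff i j hi0 hin hj0 hjn)


theorem solve_main (n k : Int) (edges : List (Int × Int × Int))
    (hpre : Pre_solve n k edges) : solve n k edges = solve_alt n k edges := by
  cases hedges : edges with
  | nil => rfl
  | cons e t =>
    have he := hpre e (by rw [hedges]; simp)
    have hn : 1 ≤ n := by omega
    have hlenP : (PySem.List.pyRange 0 n 1).length = n.toNat := by
      rw [PySem.List.length_pyRange_one]; omega
    have hgetP : ∀ i : Int, 0 ≤ i → i < n →
        PySem.List.pyGetD (PySem.List.pyRange 0 n 1) i 0 = i := by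
      intro i hi0 hin
      rw [PySem.List.pyGetD_eq_getElem _ 0 hi0 (by rw [hlenP]; omega),
          PySem.List.getElem_pyRange_one 0 n i.toNat (by rw [hlenP]; omega)]
      omega
    have hlenR : (List.replicate n.toNat (0 : Int)).length = n.toNat := by simp
    have hgetR : ∀ i : Int, 0 ≤ i → i < n →
        PySem.List.pyGetD (List.replicate n.toNat (0 : Int)) i 0 = 0 := by
      intro i hi0 hin
      rw [PySem.List.pyGetD_eq_getElem _ 0 hi0 (by rw [hlenR]; omega)]
      exact List.getElem_replicate _
    have hg : Good n (PySem.List.pyRange 0 n 1) (List.replicate n.toNat 0) := by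
      refine ⟨hlenP, hlenR, ?_, ?_⟩
      · intro i hi0 hin; rw [hgetP i hi0 hin]; exact ⟨hi0, hin⟩
      · intro i hi0 hin; left; exact hgetP i hi0 hin
    have hrb : RkB n (List.replicate n.toNat 0) n := by
      intro i hi0 hin
      rw [hgetR i hi0 hin]
      omega
    have hcard : n = (((PySem.List.pyRange 0 n 1).toFinset.card : Nat) : Int) := by
      rw [List.toFinset_card_of_nodup (PySem.List.nodup_pyRange_one 0 n), hlenP]
      omega
    have hiff : ∀ i j : Int, 0 ≤ i → i < n → 0 ≤ j → j < n →
        (RootF n (PySem.List.pyRange 0 n 1) i = RootF n (PySem.List.pyRange 0 n 1) j ↔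
         PySem.List.pyGetD (PySem.List.pyRange 0 n 1) i 0 =
           PySem.List.pyGetD (PySem.List.pyRange 0 n 1) j 0) := by
      intro i j hi0 hin hj0 hjn
      have hri : RootF n (PySem.List.pyRange 0 n 1) i = i := by
        rw [RootF_unfold n _ _ n hg hrb hn i hi0 hin, if_pos (hgetP i hi0 hin)]
      have hrj : RootF n (PySem.List.pyRange 0 n 1) j = j := by
        rw [RootF_unfold n _ _ n hg hrb hn j hj0 hjn, if_pos (hgetP j hj0 hjn)]
      rw [hri, hrj, hgetP i hi0 hin, hgetP j hj0 hjn]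
    have hes : ∀ e' ∈ PySem.List.sorted edges (fun x => -x.2.2) false,
        (-n ≤ e'.1 ∧ e'.1 < n) ∧ (-n ≤ e'.2.1 ∧ e'.2.1 < n) := by
      intro e' he'
      exact hpre e' ((PySem.List.mem_sorted edges _ false e').mp he')
    rw [← hedges]
    exact loop_eq n k hn (PySem.List.sorted edges (fun x => -x.2.2) false)
      (PySem.List.pyRange 0 n 1) (List.replicate n.toNat 0)
      (PySem.List.pyRange 0 n 1) n hg hrb hlenP hcard hiff hes

-- ===== VERDICT (by name: the statement is the Claim_ definition above) =====
theorem solve_spec : Claim_equal_solve := by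
  intro n k edges _ hpre
  unfold Spec_solve
  exact solve_main n k edges hpre
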